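-- pv_equiv track=rewrite | github.com/catman77/TSP | base.py | _is_balanced_structure
-- ===== SOURCE A (Python) =====
-- def _is_balanced_structure(s: str) -> bool:
--     """Check if the string is a balanced algebraic structure"""
--     # Check simple cases of known algebraic zeros
--     known_zeros = {"SP", "PS", "SPSP", "SPPS", "SSPP", "PPSS"}
--     if s in known_zeros:
--         return True
--
--     # For more complex cases: check that S and P alternate or are grouped in balance
--     s_count = s.count('S')
--     p_count = s.count('P')
--
--     if s_count != p_count:
--         return False
--
--     # If the string consists only of S and P in equal quantities - it's a potential zero
--     return all(c in 'SP' for c in s)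
-- ===== SOURCE B (Python) =====
-- def _is_balanced_structure(s: str) -> bool:
--     """Single pass: running S/P balance plus a validity flag."""
--     balance = 0
--     valid = True
--     for c in s:
--         if c == 'S':
--             balance += 1
--         elif c == 'P':
--             balance -= 1
--         else:
--             valid = False
--     return valid and balance == 0
-- ===== Notes on version B (the rewrite author's own statement) =====
-- stated objective: simpler
-- what changed: Replaced A's known_zeros set plus three separate scans (count('S'), count('P'), all(...)) with one loop maintaining a running S/P balance and a validity flag.
import Mathlib
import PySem

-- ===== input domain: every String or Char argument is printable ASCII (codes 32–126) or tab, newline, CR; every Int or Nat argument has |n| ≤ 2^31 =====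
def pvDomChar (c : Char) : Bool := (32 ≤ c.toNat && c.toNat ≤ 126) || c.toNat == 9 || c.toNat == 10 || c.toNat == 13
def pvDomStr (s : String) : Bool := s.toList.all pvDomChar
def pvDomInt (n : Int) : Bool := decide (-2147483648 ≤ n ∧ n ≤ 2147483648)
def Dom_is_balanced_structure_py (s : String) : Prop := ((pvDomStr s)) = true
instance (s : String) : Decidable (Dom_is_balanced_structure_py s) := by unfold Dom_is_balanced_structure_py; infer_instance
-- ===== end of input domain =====

-- B replaces A's known_zeros set and three scans with a single pass keeping a running S/P balance and a validity flag (simpler).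


-- ===== PORT A =====
-- known_zeros membership is ported as the explicit disjunction over the six literals.
def is_balanced_structure_py (s : String) : Bool :=
  if s = "SP" ∨ s = "PS" ∨ s = "SPSP" ∨ s = "SPPS" ∨ s = "SSPP" ∨ s = "PPSS" then
    true
  else
    let s_count := PySem.Str.count s "S"
    let p_count := PySem.Str.count s "P"
    if s_count ≠ p_count then false
    else s.toList.all (fun c => PySem.Chars.isIn [c] "SP".toList)

-- ===== PORT B =====
def is_balanced_structure_py_alt (s : String) : Bool :=
  let r := s.toList.foldl
    (fun (st : Int × Bool) c =>
      if c = 'S' then (st.1 + 1, st.2)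
      else if c = 'P' then (st.1 - 1, st.2)
      else (st.1, false))
    (0, true)
  r.2 && decide (r.1 = 0)

-- ===== PRECONDITION & SPEC =====
def Spec_is_balanced_structure_py (s : String) (out : Bool) : Prop := out = is_balanced_structure_py_alt s
instance (s : String) (out : Bool) : Decidable (Spec_is_balanced_structure_py s out) := by unfold Spec_is_balanced_structure_py; infer_instance

-- ===== CLAIM (what is proved, stated in full; the proofs are below) =====
def Claim_equal_is_balanced_structure_py : Prop := ∀ (s : String), Dom_is_balanced_structure_py s → Spec_is_balanced_structure_py s (is_balanced_structure_py s)

-- ===== LEMMAS AND PROOFS =====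

-- PySem.Chars.count with a single-character needle counts occurrences of that character.
theorem go_count_char (l : List Char) (c : Char) (acc : Nat) :
    PySem.Chars.count.go [c] l.length l acc = acc + l.count c := by
  induction l generalizing acc with
  | nil => simp [PySem.Chars.count.go]
  | cons a t ih =>
    simp only [List.length_cons, PySem.Chars.count.go, List.isPrefixOf, List.count_cons]
    by_cases h : c = a
    · subst h
      simp only [beq_self_eq_true, if_pos]
      simp [ih]
      omega
    · simp [h, ih, Ne.symm h]

theorem count_char (l : List Char) (c : Char) :
    PySem.Chars.count l [c] = l.count c := by
  simp [PySem.Chars.count, go_count_char]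

-- 'c in "SP"' for a single character is membership in {'S','P'}.
theorem isIn_SP (c : Char) :
    PySem.Chars.isIn [c] ['S', 'P'] = (decide (c = 'S') || decide (c = 'P')) := by
  by_cases h1 : c = 'S'
  · subst h1; decide
  · by_cases h2 : c = 'P'
    · subst h2; decide
    · simp [h1, h2, PySem.Chars.isIn_eq_false_iff]
      intro h
      have hm := List.singleton_sublist.mp h.sublist
      simp at hm
      tauto

-- Invariant of B's fold: balance = (#S - #P) shifted by the accumulator, flag = all chars in {S,P}.
theorem foldl_balance (l : List Char) (b : Int) (v : Bool) :
    l.foldl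
      (fun (st : Int × Bool) c =>
        if c = 'S' then (st.1 + 1, st.2)
        else if c = 'P' then (st.1 - 1, st.2)
        else (st.1, false)) (b, v)
    = (b + (l.count 'S' : Int) - (l.count 'P' : Int),
       v && l.all (fun c => decide (c = 'S') || decide (c = 'P'))) := by
  induction l generalizing b v with
  | nil => simp
  | cons a t ih =>
    simp only [List.foldl_cons, List.count_cons, List.all_cons]
    by_cases h1 : a = 'S'
    · subst h1
      rw [if_pos rfl, ih]
      simp only [Prod.mk.injEq]
      exact ⟨by simp; omega, by simp⟩
    · by_cases h2 : a = 'P'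
      · subst h2
        rw [if_neg (by decide), if_pos rfl, ih]
        simp only [Prod.mk.injEq]
        exact ⟨by simp; omega, by simp⟩
      · rw [if_neg h1, if_neg h2, ih]
        simp [h1, h2]

-- A, with the redundant known_zeros branch absorbed, is the same count-and-validity test.
theorem A_char (s : String) :
    is_balanced_structure_py s
      = (decide (s.toList.count 'S' = s.toList.count 'P')
         && s.toList.all (fun c => decide (c = 'S') || decide (c = 'P'))) := by
  unfold is_balanced_structure_py
  split
  · rename_i h
    rcases h with h | h | h | h | h | h <;> subst h <;> decide
  · simp only [PySem.Str.count_eq, show ("S".toList) = ['S'] from rfl,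
      show ("P".toList) = ['P'] from rfl, show ("SP".toList) = ['S', 'P'] from rfl,
      count_char]
    by_cases h : s.toList.count 'S' = s.toList.count 'P'
    · simp [h, isIn_SP]
    · simp [h]

-- ===== VERDICT (by name: the statement is the Claim_ definition above) =====
theorem is_balanced_structure_py_spec : Claim_equal_is_balanced_structure_py := by
  intro s _
  unfold Spec_is_balanced_structure_py
  rw [A_char]
  unfold is_balanced_structure_py_alt
  rw [foldl_balance]
  simp only [zero_add]
  by_cases h : s.toList.count 'S' = s.toList.count 'P'
  · simp [h, Bool.and_comm]
  · have hne : ¬ ((s.toList.count 'S' : Int) - (s.toList.count 'P' : Int) = 0) := by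
      omega
    simp [h, hne]
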